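-- pv_equiv track=rewrite | github.com/Alex-V92/Python_begin | Поколение Python,курс для начинающих/calc_rome.py | digit_func
-- ===== SOURCE A (Python) =====
-- def digit_func(x, digit_answer):
--     digit_x = 0
--     x = str(x)
--     x_len = len(x) - 1
--     for i in x:
--         digit_x += int(i) * (digit_answer ** x_len)
--         x_len -= 1
--     return digit_x
-- ===== SOURCE B (Python) =====
-- def digit_func(x, digit_answer):
--     digit_x = 0
--     for ch in str(x):
--         digit_x = digit_x * digit_answer + int(ch)
--     return digit_x
-- ===== Notes on version B (the rewrite author's own statement) =====
-- stated objective: simpler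
-- what changed: Replaces the per-digit base**power term and the separately maintained exponent counter with Horner's method: a single running accumulator digit_x = digit_x * digit_answer + int(ch).
import Mathlib
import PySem

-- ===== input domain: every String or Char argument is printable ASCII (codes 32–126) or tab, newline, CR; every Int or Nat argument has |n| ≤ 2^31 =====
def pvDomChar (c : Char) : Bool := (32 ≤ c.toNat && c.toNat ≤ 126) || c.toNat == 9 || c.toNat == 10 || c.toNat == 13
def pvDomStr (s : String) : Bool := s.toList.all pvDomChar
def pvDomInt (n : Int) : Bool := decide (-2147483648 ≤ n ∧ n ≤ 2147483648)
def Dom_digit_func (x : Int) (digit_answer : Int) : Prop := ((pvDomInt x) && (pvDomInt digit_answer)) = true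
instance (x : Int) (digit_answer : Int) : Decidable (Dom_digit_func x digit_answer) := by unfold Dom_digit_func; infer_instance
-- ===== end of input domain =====

-- B replaces A's per-digit base**power term and exponent counter with Horner's method
-- (one running accumulator); equal return values proved for all x ≥ 0 (A raises ValueError on x < 0).

-- ===== PORT A =====
-- int(i) on a single char: PySem.Int.ofStr?; '.getD 0' is only reached where Python raises
-- ValueError, which Pre_digit_func excludes (x < 0 gives the '-' char).
-- The exponent counter x_len stays ≥ 0 while it is used (it is len-1 down to 0 before each
-- decrement), so 'digit_answer ** x_len' is '^ (x_len.toNat)' exactly.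
def digit_func (x : Int) (digit_answer : Int) : Int :=
  (((PySem.Int.toStr x).toList).foldl
    (fun (st : Int × Int) i =>
      (st.1 + ((PySem.Int.ofStr? (String.ofList [i])).getD 0) * digit_answer ^ st.2.toNat,
       st.2 - 1))
    (0, ((PySem.Int.toStr x).toList.length : Int) - 1)).1

-- ===== PORT B =====
def digit_func_alt (x : Int) (digit_answer : Int) : Int :=
  ((PySem.Int.toStr x).toList).foldl
    (fun digit_x ch => digit_x * digit_answer + ((PySem.Int.ofStr? (String.ofList [ch])).getD 0))
    0

-- ===== PRECONDITION & SPEC =====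
-- A raises ValueError on x < 0 (int('-') on the sign character), so Pre_ is x ≥ 0.
def Pre_digit_func (x : Int) (_digit_answer : Int) : Prop := 0 ≤ x
instance (x : Int) (digit_answer : Int) : Decidable (Pre_digit_func x digit_answer) := by unfold Pre_digit_func; infer_instance
def pvWitness_digit_func : Int × Int := (123, 10)
def Spec_digit_func (x : Int) (digit_answer : Int) (out : Int) : Prop := out = digit_func_alt x digit_answer
instance (x : Int) (digit_answer : Int) (out : Int) : Decidable (Spec_digit_func x digit_answer out) := by unfold Spec_digit_func; infer_instance

-- ===== CLAIM (what is proved, stated in full; the proofs are below) =====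
def Claim_equal_digit_func : Prop := ∀ (x : Int) (digit_answer : Int), Dom_digit_func x digit_answer → Pre_digit_func x digit_answer → Spec_digit_func x digit_answer (digit_func x digit_answer)

-- ===== LEMMAS AND PROOFS =====

-- Horner fold from an arbitrary accumulator.
theorem horner_shift (da : Int) (d : Char → Int) :
    ∀ (l : List Char) (a : Int),
      l.foldl (fun acc c => acc * da + d c) a
        = a * da ^ l.length + l.foldl (fun acc c => acc * da + d c) 0 := by
  intro l
  induction l with
  | nil => intro a; simp
  | cons c t ih =>
    intro a
    simp only [List.foldl_cons, List.length_cons]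
    rw [ih (a * da + d c), ih (0 * da + d c)]
    ring

-- A's positional fold, started with the counter at length - 1, equals the Horner fold.
theorem pos_eq_horner (da : Int) (d : Char → Int) :
    ∀ (l : List Char) (a : Int),
      (l.foldl (fun (st : Int × Int) c => (st.1 + d c * da ^ st.2.toNat, st.2 - 1))
          (a, (l.length : Int) - 1)).1
        = a + l.foldl (fun acc c => acc * da + d c) 0 := by
  intro l
  induction l with
  | nil => intro a; simp
  | cons c t ih =>
    intro a
    simp only [List.foldl_cons, List.length_cons]
    push_cast
    rw [show ((t.length : Int) + 1 - 1 - 1) = (t.length : Int) - 1 by ring,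
        show ((t.length : Int) + 1 - 1).toNat = t.length by omega,
        ih (a + d c * da ^ t.length), horner_shift da d t (0 * da + d c)]
    ring

-- ===== VERDICT (by name: the statement is the Claim_ definition above) =====
theorem digit_func_spec : Claim_equal_digit_func := by
  intro x da _ _
  unfold Spec_digit_func digit_func digit_func_alt
  simpa using pos_eq_horner da (fun i => (PySem.Int.ofStr? (String.ofList [i])).getD 0)
    ((PySem.Int.toStr x).toList) 0
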